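-- pv_equiv track=rewrite | github.com/pbjustin/Arcanos | daemon-python/arcanos/agentic/patch_orchestrator.py | _parse_files_from_patch
-- ===== SOURCE A (Python) =====
-- def _parse_files_from_patch(patch_text: str) -> list[str]:
--     files: list[str] = []
--     for line in patch_text.splitlines():
--         line = line.strip()
--         if line.startswith("+++ b/"):
--             files.append(line.replace("+++ b/", "", 1).strip())
--     if not files:
--         for line in patch_text.splitlines():
--             if line.startswith("+++ "):
--                 p = line[4:].strip()
--                 if p.startswith("b/"):
--                     p = p[2:]
--                 files.append(p)
--     out, seen = [], set()
--     for f in files: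
--         if f and f not in seen:
--             seen.add(f)
--             out.append(f)
--     return out
-- ===== SOURCE B (Python) =====
-- def _parse_files_from_patch(patch_text: str) -> list[str]:
--     # One pass over the lines carrying two accumulators (strict '+++ b/' hits on
--     # the stripped line, loose '+++ ' hits on the raw line), then the original
--     # fallback choice and an ordered dedup via dict.fromkeys.
--     strict: list[str] = []
--     loose: list[str] = []
--     for line in patch_text.splitlines():
--         s = line.strip()
--         if s.startswith("+++ b/"):
--             strict.append(s.replace("+++ b/", "", 1).strip())
--         if line.startswith("+++ "):
--             p = line[4:].strip()
--             if p.startswith("b/"):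
--                 p = p[2:]
--             loose.append(p)
--     files = strict if strict else loose
--     return list(dict.fromkeys(f for f in files if f))
-- ===== Notes on version B (the rewrite author's own statement) =====
-- stated objective: alternative
-- what changed: Replaces A's two sequential scans over the lines plus a manual seen-set dedup loop by a single pass carrying two accumulators (strict and loose candidates) followed by an ordered dedup via dict.fromkeys over the non-empty names.
import Mathlib
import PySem

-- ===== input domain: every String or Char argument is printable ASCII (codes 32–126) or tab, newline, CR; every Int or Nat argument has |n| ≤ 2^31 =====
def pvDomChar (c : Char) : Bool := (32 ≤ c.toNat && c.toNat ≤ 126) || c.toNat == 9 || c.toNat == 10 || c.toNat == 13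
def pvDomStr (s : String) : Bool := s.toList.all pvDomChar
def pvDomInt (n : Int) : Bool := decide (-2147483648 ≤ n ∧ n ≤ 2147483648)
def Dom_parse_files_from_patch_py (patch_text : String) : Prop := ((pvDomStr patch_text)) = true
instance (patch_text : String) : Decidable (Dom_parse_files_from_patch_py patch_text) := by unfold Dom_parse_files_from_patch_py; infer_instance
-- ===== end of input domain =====

-- B is an alternative, structurally different implementation: one pass with two accumulators
-- plus an ordered dedup, instead of A's two sequential scans and a manual seen-set loop.

-- ===== PORT A =====
-- s.replace(old, new, 1): replace the FIRST occurrence only; exact hand port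
-- (PySem.Str.replace has no count parameter), via the first-occurrence index PySem.Str.find.
def pvReplace1 (s old new : String) : String :=
  let i := PySem.Str.find s old
  if i < 0 then s
  else String.ofList (s.toList.take i.toNat ++ new.toList ++ s.toList.drop (i.toNat + old.toList.length))

def parse_files_from_patch_py (patch_text : String) : List String :=
  let files : List String :=
    (PySem.Str.splitlines patch_text).foldl (fun files line =>
      let line := PySem.Str.strip line
      if PySem.Str.startswith line "+++ b/" then
        files ++ [PySem.Str.strip (pvReplace1 line "+++ b/" "")]
      else files) []
  let files : List String :=
    if files = [] then
      (PySem.Str.splitlines patch_text).foldl (fun files line =>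
        if PySem.Str.startswith line "+++ " then
          let p := PySem.Str.strip (PySem.Str.slice line (some 4) none)
          let p := if PySem.Str.startswith p "b/" then PySem.Str.slice p (some 2) none else p
          files ++ [p]
        else files) files
    else files
  (files.foldl (fun (acc : List String × PySem.Set String) f =>
      if f ≠ "" ∧ ¬ (PySem.Set.contains acc.2 f = true) then (acc.1 ++ [f], PySem.Set.add acc.2 f)
      else acc) ([], PySem.Set.empty)).1

-- ===== PORT B =====
def parse_files_from_patch_py_alt (patch_text : String) : List String :=
  let p : List String × List String :=
    (PySem.Str.splitlines patch_text).foldl (fun acc line =>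
      let s := PySem.Str.strip line
      (if PySem.Str.startswith s "+++ b/" then
          acc.1 ++ [PySem.Str.strip (pvReplace1 s "+++ b/" "")]
        else acc.1,
       if PySem.Str.startswith line "+++ " then
          let q := PySem.Str.strip (PySem.Str.slice line (some 4) none)
          acc.2 ++ [if PySem.Str.startswith q "b/" then PySem.Str.slice q (some 2) none else q]
        else acc.2)) ([], [])
  let files : List String := if p.1 ≠ [] then p.1 else p.2
  PySem.List.dedup (files.filter (fun f => f ≠ ""))

-- ===== PRECONDITION & SPEC =====
def Spec_parse_files_from_patch_py (patch_text : String) (out : List String) : Prop := out = parse_files_from_patch_py_alt patch_text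
instance (patch_text : String) (out : List String) : Decidable (Spec_parse_files_from_patch_py patch_text out) := by unfold Spec_parse_files_from_patch_py; infer_instance

-- ===== CLAIM (what is proved, stated in full; the proofs are below) =====
def Claim_equal_parse_files_from_patch_py : Prop := ∀ (patch_text : String), Dom_parse_files_from_patch_py patch_text → Spec_parse_files_from_patch_py patch_text (parse_files_from_patch_py patch_text)

-- ===== LEMMAS AND PROOFS =====

-- B's single pass with a pair accumulator is the pair of A's two scans.
theorem pv_pairfold (lines : List String) (a b : List String) :
    lines.foldl (fun (acc : List String × List String) line =>
      let s := PySem.Str.strip line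
      (if PySem.Str.startswith s "+++ b/" then
          acc.1 ++ [PySem.Str.strip (pvReplace1 s "+++ b/" "")]
        else acc.1,
       if PySem.Str.startswith line "+++ " then
          let q := PySem.Str.strip (PySem.Str.slice line (some 4) none)
          acc.2 ++ [if PySem.Str.startswith q "b/" then PySem.Str.slice q (some 2) none else q]
        else acc.2)) (a, b)
    = (lines.foldl (fun files line =>
         let line := PySem.Str.strip line
         if PySem.Str.startswith line "+++ b/" then
           files ++ [PySem.Str.strip (pvReplace1 line "+++ b/" "")]
         else files) a,
       lines.foldl (fun files line =>
         if PySem.Str.startswith line "+++ " then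
           let p := PySem.Str.strip (PySem.Str.slice line (some 4) none)
           let p := if PySem.Str.startswith p "b/" then PySem.Str.slice p (some 2) none else p
           files ++ [p]
         else files) b) := by
  induction lines generalizing a b with
  | nil => rfl
  | cons l t ih => simp only [List.foldl_cons]; exact ih _ _

-- A's seen-set dedup loop, started on synchronized accumulators, is a fold of Set.add
-- over the non-empty elements.
theorem pv_dedup_loop (fs : List String) (s : PySem.Set String) :
    (fs.foldl (fun (acc : List String × PySem.Set String) f =>
      if f ≠ "" ∧ ¬ (PySem.Set.contains acc.2 f = true) then (acc.1 ++ [f], PySem.Set.add acc.2 f)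
      else acc) (s, s)).1
    = (fs.filter (fun f => f ≠ "")).foldl PySem.Set.add s := by
  induction fs generalizing s with
  | nil => rfl
  | cons f t ih =>
    by_cases hf : f = ""
    · simp only [List.foldl_cons, List.filter_cons, hf]
      simp only [ne_eq, not_true_eq_false, false_and, if_false]
      simpa using ih s
    · simp only [List.foldl_cons, List.filter_cons, ne_eq, hf, not_false_eq_true, decide_true,
        if_true, true_and]
      by_cases hc : PySem.Set.contains s f = true
      · have hadd : PySem.Set.add s f = s := by
          simp only [PySem.Set.add, hc, if_true]
        simp only [hc, not_true_eq_false, if_false, hadd]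
        exact ih s
      · have hadd : PySem.Set.add s f = s ++ [f] := by
          simp only [PySem.Set.add, hc, Bool.false_eq_true, if_false]
        simp only [hc, ← hadd]
        exact ih (PySem.Set.add s f)

-- A's fallback-or-strict choice equals B's choice 'strict if strict else loose'.
theorem pv_final (lines : List String) :
    PySem.List.dedup (List.filter (fun f => f ≠ "")
      (if (lines.foldl (fun files line =>
            if PySem.Str.startswith (PySem.Str.strip line) "+++ b/" then
              files ++ [PySem.Str.strip (pvReplace1 (PySem.Str.strip line) "+++ b/" "")]
            else files) []) = [] then
        lines.foldl (fun files line =>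
          if PySem.Str.startswith line "+++ " then
            files ++ [if PySem.Str.startswith (PySem.Str.strip (PySem.Str.slice line (some 4) none)) "b/" then
                PySem.Str.slice (PySem.Str.strip (PySem.Str.slice line (some 4) none)) (some 2) none
              else PySem.Str.strip (PySem.Str.slice line (some 4) none)]
          else files)
          (lines.foldl (fun files line =>
            if PySem.Str.startswith (PySem.Str.strip line) "+++ b/" then
              files ++ [PySem.Str.strip (pvReplace1 (PySem.Str.strip line) "+++ b/" "")]
            else files) [])
      else
        lines.foldl (fun files line =>
          if PySem.Str.startswith (PySem.Str.strip line) "+++ b/" then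
            files ++ [PySem.Str.strip (pvReplace1 (PySem.Str.strip line) "+++ b/" "")]
          else files) []))
    = PySem.List.dedup (List.filter (fun f => f ≠ "")
      (if (lines.foldl (fun files line =>
            if PySem.Str.startswith (PySem.Str.strip line) "+++ b/" then
              files ++ [PySem.Str.strip (pvReplace1 (PySem.Str.strip line) "+++ b/" "")]
            else files) []) ≠ [] then
        lines.foldl (fun files line =>
          if PySem.Str.startswith (PySem.Str.strip line) "+++ b/" then
            files ++ [PySem.Str.strip (pvReplace1 (PySem.Str.strip line) "+++ b/" "")]
          else files) []
      else
        lines.foldl (fun files line =>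
          if PySem.Str.startswith line "+++ " then
            files ++ [if PySem.Str.startswith (PySem.Str.strip (PySem.Str.slice line (some 4) none)) "b/" then
                PySem.Str.slice (PySem.Str.strip (PySem.Str.slice line (some 4) none)) (some 2) none
              else PySem.Str.strip (PySem.Str.slice line (some 4) none)]
          else files) [])) := by
  by_cases h : (lines.foldl (fun files line =>
      if PySem.Str.startswith (PySem.Str.strip line) "+++ b/" then
        files ++ [PySem.Str.strip (pvReplace1 (PySem.Str.strip line) "+++ b/" "")]
      else files) []) = []
  · rw [if_pos h, if_neg (fun hn => hn h), h]
  · rw [if_neg h, if_pos h]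

theorem pv_dedup_loop0 (fs : List String) :
    (fs.foldl (fun (acc : List String × PySem.Set String) f =>
      if f ≠ "" ∧ ¬ (PySem.Set.contains acc.2 f = true) then (acc.1 ++ [f], PySem.Set.add acc.2 f)
      else acc) ([], PySem.Set.empty)).1
    = PySem.List.dedup (fs.filter (fun f => f ≠ "")) := by
  rw [PySem.List.dedup_eq_ofList, PySem.Set.ofList_eq_foldl]
  exact pv_dedup_loop fs PySem.Set.empty

-- ===== VERDICT (by name: the statement is the Claim_ definition above) =====
theorem parse_files_from_patch_py_spec : Claim_equal_parse_files_from_patch_py := by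
  intro patch_text _
  unfold Spec_parse_files_from_patch_py
  simp only [parse_files_from_patch_py, parse_files_from_patch_py_alt]
  rw [pv_pairfold]
  rw [pv_dedup_loop0]
  exact pv_final (PySem.Str.splitlines patch_text)
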